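-- pv_equiv track=rewrite | github.com/hallamlab/TreeSAPP | treesapp/assign.py | enumerate_taxonomic_lineages
-- ===== SOURCE A (Python) =====
-- def enumerate_taxonomic_lineages(lineage_list):
--     rank = 1
--     taxonomic_counts = dict()
--     while rank < 9:
--         for lineage in lineage_list:
--             if len(lineage) < rank:
--                 continue
--             taxonomy = "; ".join(lineage[:rank])
--             if taxonomy not in taxonomic_counts:
--                 taxonomic_counts[taxonomy] = 0
--             taxonomic_counts[taxonomy] += 1
--         rank += 1
--     return taxonomic_counts
-- ===== SOURCE B (Python) =====
-- def enumerate_taxonomic_lineages(lineage_list):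
--     # One pass over the lineages: build each prefix incrementally and count it
--     # in a per-rank bucket, then merge the eight buckets rank by rank.
--     per_rank = [dict() for _ in range(8)]
--     for lineage in lineage_list:
--         prefix = ""
--         for i, name in enumerate(lineage[:8]):
--             prefix = name if i == 0 else prefix + "; " + name
--             bucket = per_rank[i]
--             bucket[prefix] = bucket.get(prefix, 0) + 1
--     result = dict()
--     for bucket in per_rank:
--         for key, count in bucket.items():
--             result[key] = result.get(key, 0) + count
--     return result
-- ===== Notes on version B (the rewrite author's own statement) =====
-- stated objective: alternative
-- what changed: B makes a single pass over the lineages, growing each prefix incrementally and counting it into one of eight per-rank bucket dicts, then merges the buckets rank by rank, instead of A's eight rank-major passes over the whole list that re-join every prefix from scratch; counts and insertion order are identical.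
import Mathlib
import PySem

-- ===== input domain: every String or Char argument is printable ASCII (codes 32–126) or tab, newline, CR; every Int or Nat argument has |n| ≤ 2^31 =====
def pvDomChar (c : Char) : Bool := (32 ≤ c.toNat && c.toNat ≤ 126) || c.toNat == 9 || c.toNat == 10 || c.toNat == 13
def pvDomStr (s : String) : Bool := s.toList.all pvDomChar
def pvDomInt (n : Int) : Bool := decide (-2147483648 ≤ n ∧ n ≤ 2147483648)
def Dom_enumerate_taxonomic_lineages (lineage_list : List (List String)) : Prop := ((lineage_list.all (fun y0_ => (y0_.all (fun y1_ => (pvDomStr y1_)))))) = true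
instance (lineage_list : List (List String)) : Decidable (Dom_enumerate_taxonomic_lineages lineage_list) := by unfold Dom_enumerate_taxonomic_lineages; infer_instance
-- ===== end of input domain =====

-- B counts every lineage prefix in ONE pass over the lineages (building each prefix
-- incrementally into eight per-rank buckets, merged at the end) instead of A's eight
-- full passes that re-join every prefix from scratch; same dict, same insertion order.

-- ===== PORT A =====
def enumerate_taxonomic_lineages (lineage_list : List (List String)) : List (String × Int) :=
  let tc : PySem.Dict String Int :=
    (PySem.List.pyRange 1 9 1).foldl (fun tc rank =>
      lineage_list.foldl (fun tc lineage =>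
        if PySem.List.len lineage < rank then tc
        else
          let taxonomy := PySem.Str.join "; " (PySem.List.slice lineage none (some rank))
          let tc1 := if tc.contains taxonomy then tc else tc.insert taxonomy 0
          tc1.insert taxonomy (tc1.getD taxonomy 0 + 1)) tc)
      PySem.Dict.empty
  tc.items

-- ===== PORT B =====
def enumerate_taxonomic_lineages_alt (lineage_list : List (List String)) : List (String × Int) :=
  let per_rank0 : List (PySem.Dict String Int) := List.replicate 8 PySem.Dict.empty
  let per_rank := lineage_list.foldl (fun per_rank lineage =>
    ((PySem.List.enumerate (PySem.List.slice lineage none (some 8)) 0).foldl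
      (fun (st : String × List (PySem.Dict String Int)) p =>
        let pfx := if p.1 == 0 then p.2 else st.1 ++ "; " ++ p.2
        let bucket := PySem.List.pyGetD st.2 p.1 PySem.Dict.empty
        (pfx, PySem.List.pySetD st.2 p.1 (bucket.insert pfx (bucket.getD pfx 0 + 1))))
      ("", per_rank)).2) per_rank0
  let result := per_rank.foldl (fun result bucket =>
    bucket.items.foldl (fun result kc => result.insert kc.1 (result.getD kc.1 0 + kc.2)) result)
    PySem.Dict.empty
  result.items

-- ===== PRECONDITION & SPEC =====
def Spec_enumerate_taxonomic_lineages (lineage_list : List (List String)) (out : List (String × Int)) : Prop := out = enumerate_taxonomic_lineages_alt lineage_list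
instance (lineage_list : List (List String)) (out : List (String × Int)) : Decidable (Spec_enumerate_taxonomic_lineages lineage_list out) := by unfold Spec_enumerate_taxonomic_lineages; infer_instance

-- ===== CLAIM (what is proved, stated in full; the proofs are below) =====
def Claim_equal_enumerate_taxonomic_lineages : Prop := ∀ (lineage_list : List (List String)), Dom_enumerate_taxonomic_lineages lineage_list → Spec_enumerate_taxonomic_lineages lineage_list (enumerate_taxonomic_lineages lineage_list)

-- ===== LEMMAS AND PROOFS =====

def pvInsAdd (d : PySem.Dict String Int) (k : String) (c : Int) : PySem.Dict String Int :=
  d.insert k (d.getD k 0 + c)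

def pvAddOnes (d : PySem.Dict String Int) (ps : List String) : PySem.Dict String Int :=
  ps.foldl (fun d p => pvInsAdd d p 1) d

def pvTax (r : Int) (lin : List String) : String :=
  PySem.Str.join "; " (PySem.List.slice lin none (some r))

def pvYs (r : Int) (ls : List (List String)) : List String :=
  (ls.filter (fun lin => !decide (PySem.List.len lin < r))).map (pvTax r)

def pvChain (pfx : String) (m : Nat) : List String → List String
  | [] => []
  | x :: xs => (if m = 0 then x else pfx ++ "; " ++ x) ::
               pvChain (if m = 0 then x else pfx ++ "; " ++ x) (m+1) xs

def pvUpdAll (pr : List (PySem.Dict String Int)) (m : Nat) : List String → List (PySem.Dict String Int)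
  | [] => pr
  | p :: ps => pvUpdAll (pr.set m (pvInsAdd (pr.getD m PySem.Dict.empty) p 1)) (m+1) ps

theorem pv_dbl (tc : PySem.Dict String Int) (k : String) :
    (let tc1 := if tc.contains k then tc else tc.insert k 0
     tc1.insert k (tc1.getD k 0 + 1)) = pvInsAdd tc k 1 := by
  by_cases hc : tc.contains k = true
  · simp [hc, pvInsAdd]
  · simp only [Bool.not_eq_true] at hc
    have h0 : tc.getD k 0 = 0 := PySem.Dict.getD_of_not_contains tc 0 hc
    simp [hc, pvInsAdd, PySem.Dict.getD_insert_self, PySem.Dict.insert_insert_self, h0]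

theorem pv_A_inner (r : Int) (ls : List (List String)) (tc : PySem.Dict String Int) :
    ls.foldl (fun tc lineage =>
        if PySem.List.len lineage < r then tc
        else
          let taxonomy := PySem.Str.join "; " (PySem.List.slice lineage none (some r))
          let tc1 := if tc.contains taxonomy then tc else tc.insert taxonomy 0
          tc1.insert taxonomy (tc1.getD taxonomy 0 + 1)) tc
      = pvAddOnes tc (pvYs r ls) := by
  induction ls generalizing tc with
  | nil => rfl
  | cons lin ls ih =>
    simp only [List.foldl_cons]
    by_cases h : PySem.List.len lin < r
    · rw [if_pos h, ih]
      have : pvYs r (lin :: ls) = pvYs r ls := by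
        simp only [pvYs, List.filter_cons]
        simp only [PySem.List.len_eq] at h
        simp [not_le.mpr h]
      rw [this]
    · rw [if_neg h, ih, pv_dbl]
      have : pvYs r (lin :: ls) = pvTax r lin :: pvYs r ls := by
        simp only [pvYs, List.filter_cons]
        simp only [PySem.List.len_eq] at h
        simp [not_lt.mp h]
      rw [this, pvAddOnes, pvAddOnes, List.foldl_cons]
      rfl

-- chain defs

theorem pv_insert_comm (d : PySem.Dict String Int) (x k : String) (w v : Int)
    (hx : d.contains x = true) (hk : k ≠ x) :
    (d.insert x w).insert k v = (d.insert k v).insert x w := by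
  apply PySem.Dict.ext
  by_cases hck : d.contains k = true
  · rw [PySem.Dict.items_insert_of_contains, PySem.Dict.items_insert_of_contains,
        PySem.Dict.items_insert_of_contains, PySem.Dict.items_insert_of_contains]
    · simp only [List.map_map]
      apply List.map_congr_left
      intro p _
      by_cases h1 : p.1 == x <;> by_cases h2 : p.1 == k <;>
        simp_all [Function.comp, beq_iff_eq]
    all_goals simp [PySem.Dict.contains_insert, hx, hck]
  · simp only [Bool.not_eq_true] at hck
    have cx' : (d.insert k v).contains x = true := by
      simp [PySem.Dict.contains_insert, hx]
    have ck' : (d.insert x w).contains k = false := by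
      simp [PySem.Dict.contains_insert, hck, hk]
    rw [PySem.Dict.items_insert_of_not_contains (h := ck'),
        PySem.Dict.items_insert_of_contains (h := hx),
        PySem.Dict.items_insert_of_contains (h := cx'),
        PySem.Dict.items_insert_of_not_contains (h := hck)]
    simp [hk]

theorem pv_getD_fold (l : List String) (d : PySem.Dict String Int) (x : String)
    (f : String → Int) (hx : x ∉ l) :
    (l.foldl (fun d k => pvInsAdd d k (f k)) d).getD x 0 = d.getD x 0 := by
  induction l generalizing d with
  | nil => rfl
  | cons a l ih =>
    simp only [List.mem_cons, not_or] at hx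
    simp only [List.foldl_cons]
    rw [ih _ hx.2, pvInsAdd, PySem.Dict.getD_insert_of_ne (hne := hx.1)]

theorem pv_gen (l : List String) (d : PySem.Dict String Int) (x : String) (w : Int)
    (f : String → Int) (hx : x ∉ l) (hc : d.contains x = true) :
    l.foldl (fun d k => pvInsAdd d k (f k)) (d.insert x w)
      = (l.foldl (fun d k => pvInsAdd d k (f k)) d).insert x w := by
  induction l generalizing d with
  | nil => rfl
  | cons a l ih =>
    simp only [List.mem_cons, not_or] at hx
    simp only [List.foldl_cons]
    have hga : (d.insert x w).getD a 0 = d.getD a 0 :=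
      PySem.Dict.getD_insert_of_ne d w 0 (Ne.symm hx.1)
    have step : pvInsAdd (d.insert x w) a (f a) = (pvInsAdd d a (f a)).insert x w := by
      rw [pvInsAdd, pvInsAdd, hga]
      exact pv_insert_comm d x a w _ hc (Ne.symm hx.1)
    rw [step, ih _ hx.2]
    simp [pvInsAdd, PySem.Dict.contains_insert, hc]

theorem pv_push (l : List String) (d : PySem.Dict String Int) (x : String) (v : Int)
    (f : String → Int) (hx : x ∉ l) :
    l.foldl (fun d k => pvInsAdd d k (f k)) (pvInsAdd d x (v + 1))
      = pvInsAdd (l.foldl (fun d k => pvInsAdd d k (f k)) (pvInsAdd d x v)) x 1 := by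
  have h1 : pvInsAdd d x (v + 1) = (pvInsAdd d x v).insert x (d.getD x 0 + v + 1) := by
    show d.insert x _ = (d.insert x _).insert x _
    rw [PySem.Dict.insert_insert_self]; ring_nf
  have hc : (pvInsAdd d x v).contains x = true := by
    rw [pvInsAdd]; exact PySem.Dict.contains_insert_self ..
  rw [h1, pv_gen _ _ _ _ _ hx hc]
  conv_rhs => rw [pvInsAdd]
  rw [pv_getD_fold _ _ _ _ hx]
  have e : (pvInsAdd d x v).getD x 0 = d.getD x 0 + v := by
    rw [pvInsAdd, PySem.Dict.getD_insert_self]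
  rw [e]

theorem pv_bump (l : List String) (x : String) (d : PySem.Dict String Int)
    (f : String → Int) (hnd : l.Nodup) (hx : x ∈ l) :
    l.foldl (fun d k => pvInsAdd d k (f k + if k = x then 1 else 0)) d
      = pvInsAdd (l.foldl (fun d k => pvInsAdd d k (f k)) d) x 1 := by
  induction l generalizing d with
  | nil => cases hx
  | cons a l ih =>
    simp only [List.nodup_cons] at hnd
    simp only [List.foldl_cons]
    rcases List.mem_cons.mp hx with h | h
    · subst h
      rw [if_pos rfl]
      have congr1 : l.foldl (fun d k => pvInsAdd d k (f k + if k = x then 1 else 0))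
            (pvInsAdd d x (f x + 1))
          = l.foldl (fun d k => pvInsAdd d k (f k)) (pvInsAdd d x (f x + 1)) := by
        apply PySem.List.foldl_congr_mem
        intro acc k hk
        have : k ≠ x := fun e => by subst e; exact hnd.1 hk
        simp [this]
      rw [congr1]
      exact pv_push l d x (f x) f hnd.1
    · have ha : a ≠ x := fun e => by rw [e] at hnd; exact hnd.1 h
      rw [if_neg ha, add_zero]
      exact ih _ hnd.2 h

theorem pv_agg (ys : List String) (res : PySem.Dict String Int) :
    (PySem.Set.ofList ys).foldl (fun res k => pvInsAdd res k ((ys.count k : Int))) res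
      = pvAddOnes res ys := by
  induction ys using List.reverseRecOn generalizing res with
  | nil => rfl
  | append_singleton ys x ih =>
    rw [PySem.Set.ofList_append_singleton]
    have hcnt : ∀ k, ((ys ++ [x]).count k : Int) = (ys.count k : Int) + if k = x then 1 else 0 := by
      intro k
      rw [List.count_append, List.count_singleton]
      rcases eq_or_ne k x with h | h
      · simp [h]
      · have hb : (x == k) = false := beq_eq_false_iff_ne.mpr (Ne.symm h)
        simp [hb, h]
    by_cases hx : x ∈ ys
    · rw [PySem.Set.add_of_mem ((PySem.Set.mem_ofList ys x).mpr hx)]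
      have e1 : (PySem.Set.ofList ys).foldl (fun res k => pvInsAdd res k (((ys ++ [x]).count k : Int))) res
          = (PySem.Set.ofList ys).foldl (fun res k => pvInsAdd res k ((ys.count k : Int) + if k = x then 1 else 0)) res := by
        apply PySem.List.foldl_congr_mem
        intro acc k _
        rw [hcnt k]
      rw [e1, pv_bump _ _ _ _ (PySem.Set.nodup_ofList ys) ((PySem.Set.mem_ofList ys x).mpr hx), ih]
      rw [pvAddOnes, pvAddOnes, List.foldl_append]
      rfl
    · rw [PySem.Set.add_of_not_mem (fun c => hx ((PySem.Set.mem_ofList ys x).mp c)), List.foldl_append]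
      have e1 : (PySem.Set.ofList ys).foldl (fun res k => pvInsAdd res k (((ys ++ [x]).count k : Int))) res
          = (PySem.Set.ofList ys).foldl (fun res k => pvInsAdd res k ((ys.count k : Int))) res := by
        apply PySem.List.foldl_congr_mem
        intro acc k hk
        rw [hcnt k, if_neg, add_zero]
        exact fun e => hx ((PySem.Set.mem_ofList ys x).mp (e ▸ hk))
      rw [e1, ih]
      simp only [List.foldl_cons, List.foldl_nil]
      rw [pvAddOnes, pvAddOnes, List.foldl_append]
      simp only [List.foldl_cons, List.foldl_nil]
      congr 2
      · rw [List.count_append]; simp [List.count_eq_zero_of_not_mem hx]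

theorem pv_merge (ys : List String) (res : PySem.Dict String Int) :
    (pvAddOnes PySem.Dict.empty ys).items.foldl
        (fun res kc => res.insert kc.1 (res.getD kc.1 0 + kc.2)) res
      = pvAddOnes res ys := by
  have hcnt : pvAddOnes PySem.Dict.empty ys = PySem.Dict.counter ys := by
    rw [pvAddOnes, ← PySem.Dict.foldl_insert_getD_add_one_eq_counter]
    rfl
  rw [hcnt, PySem.Dict.items_counter, List.foldl_map]
  exact pv_agg ys res

theorem pv_chars_join_snoc (c x : List Char) (l : List (List Char)) :
    PySem.Chars.join c (l ++ [x]) =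
      if l = [] then x else PySem.Chars.join c l ++ c ++ x := by
  induction l with
  | nil => simp [PySem.Chars.join_singleton]
  | cons a l ihl =>
    rcases eq_or_ne l [] with h | h
    · subst h
      simp [PySem.Chars.join_cons_cons, PySem.Chars.join_singleton]
    · rcases l with _ | ⟨b, l⟩
      · simp at h
      · rw [if_neg (by simp)]
        rw [if_neg h] at ihl
        simp only [List.cons_append, PySem.Chars.join_cons_cons] at ihl ⊢
        simp [ihl]

theorem pv_join_snoc (u : List String) (x : String) :
    PySem.Str.join "; " (u ++ [x]) =
      if u = [] then x else PySem.Str.join "; " u ++ "; " ++ x := by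
  apply String.toList_inj.mp
  rw [PySem.Str.toList_join, List.map_append, List.map_singleton, pv_chars_join_snoc]
  rcases eq_or_ne u [] with h | h
  · subst h; simp
  · rw [if_neg (by simpa using h), if_neg h]
    simp [String.toList_append, PySem.Str.toList_join]

theorem pv_join_empty : PySem.Str.join "; " ([] : List String) = "" := by
  apply String.toList_inj.mp
  simp [PySem.Str.toList_join, PySem.Chars.join_nil]

theorem pv_chain_length (s : List String) (pfx : String) (m : Nat) :
    (pvChain pfx m s).length = s.length := by
  induction s generalizing pfx m with
  | nil => rfl
  | cons x xs ih => simp [pvChain, ih]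

theorem pv_updAll_length (ps : List String) (pr : List (PySem.Dict String Int)) (m : Nat) :
    (pvUpdAll pr m ps).length = pr.length := by
  induction ps generalizing pr m with
  | nil => rfl
  | cons p ps ih => simp [pvUpdAll, ih]

theorem pv_updAll_getD (ps : List String) (pr : List (PySem.Dict String Int)) (m j : Nat)
    (h : m + ps.length ≤ pr.length) :
    (pvUpdAll pr m ps).getD j PySem.Dict.empty =
      if m ≤ j ∧ j < m + ps.length
      then pvInsAdd (pr.getD j PySem.Dict.empty) (ps.getD (j - m) "") 1
      else pr.getD j PySem.Dict.empty := by
  induction ps generalizing pr m with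
  | nil =>
    simp only [pvUpdAll, List.length_nil, Nat.add_zero]
    rw [if_neg (by omega)]
  | cons p ps ih =>
    simp only [pvUpdAll]
    rw [ih _ (m+1) (by simp only [List.length_set]; simp only [List.length_cons] at h; omega)]
    have hm : m < pr.length := by simp only [List.length_cons] at h; omega
    have hgset : ∀ jj : Nat, (pr.set m (pvInsAdd (pr.getD m PySem.Dict.empty) p 1)).getD jj PySem.Dict.empty
        = if jj = m then pvInsAdd (pr.getD m PySem.Dict.empty) p 1 else pr.getD jj PySem.Dict.empty := by
      intro jj
      rcases eq_or_ne jj m with e | e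
      · subst e; simp [List.getD_eq_getElem?_getD, hm]
      · simp only [List.getD_eq_getElem?_getD, List.getElem?_set_ne (Ne.symm e)]
        rw [if_neg e]
    rw [hgset j]
    rcases eq_or_ne j m with e | e
    · subst e
      rw [if_pos rfl, if_neg (by omega), if_pos (by simp only [List.length_cons]; omega)]
      simp
    · rw [if_neg e]
      by_cases hc : m + 1 ≤ j ∧ j < m + 1 + ps.length
      · rw [if_pos hc, if_pos (by simp only [List.length_cons]; omega)]
        have hsh : j - m = (j - (m+1)) + 1 := by omega
        rw [hsh, List.getD_cons_succ]
      · rw [if_neg hc, if_neg (by simp only [List.length_cons]; omega)]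

theorem pv_chain_getD (s u : List String) (j : Nat) (hj : j < s.length) :
    (pvChain (PySem.Str.join "; " u) u.length s).getD j "" =
      PySem.Str.join "; " (u ++ s.take (j + 1)) := by
  induction s generalizing u j with
  | nil => cases hj
  | cons x xs ih =>
    have hhead : (if u.length = 0 then x else PySem.Str.join "; " u ++ "; " ++ x)
        = PySem.Str.join "; " (u ++ [x]) := by
      rw [pv_join_snoc]
      rcases eq_or_ne u [] with h | h
      · simp [h]
      · rw [if_neg h, if_neg (by simpa [List.length_eq_zero_iff] using h)]
    cases j with
    | zero =>
      simp only [pvChain, hhead, List.getD_cons_zero]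
      simp
    | succ j =>
      simp only [pvChain, hhead, List.getD_cons_succ]
      have := ih (u ++ [x]) j (by simpa using Nat.lt_of_succ_lt_succ hj)
      simp only [List.length_append, List.length_singleton] at this
      rw [this]
      simp [List.append_assoc]

theorem pv_inner_gen (s : List String) (m : Nat) (pfx : String)
    (pr : List (PySem.Dict String Int)) :
    (PySem.List.enumerate s (m : Int)).foldl
      (fun (st : String × List (PySem.Dict String Int)) p =>
        let pfx := if p.1 == 0 then p.2 else st.1 ++ "; " ++ p.2
        let bucket := PySem.List.pyGetD st.2 p.1 PySem.Dict.empty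
        (pfx, PySem.List.pySetD st.2 p.1 (bucket.insert pfx (bucket.getD pfx 0 + 1))))
      (pfx, pr)
    = ((pvChain pfx m s).getLastD pfx, pvUpdAll pr m (pvChain pfx m s)) := by
  induction s generalizing m pfx pr with
  | nil => rfl
  | cons x xs ih =>
    rw [PySem.List.enumerate_cons, List.foldl_cons]
    have hbeq : (((m : Int)) == 0) = decide (m = 0) := by
      rcases Nat.eq_zero_or_pos m with h | h
      · subst h; simp
      · have h0 : ((m : Int)) ≠ 0 := by omega
        rw [beq_eq_false_iff_ne.mpr h0, decide_eq_false (by omega)]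
    have hcast : (m : Int) + 1 = ((m + 1 : Nat) : Int) := by push_cast; ring
    simp only [hbeq, PySem.List.pyGetD_natCast, PySem.List.pySetD_natCast, hcast]
    rw [ih]
    by_cases hm : m = 0 <;>
      simp only [hm, decide_true, decide_false, if_true, if_false, pvChain,
        List.getLastD_cons, pvUpdAll] <;> rfl

theorem pv_outer (ls : List (List String)) (pr : List (PySem.Dict String Int))
    (h : pr.length = 8) :
    ls.foldl (fun per_rank lineage =>
      ((PySem.List.enumerate (PySem.List.slice lineage none (some 8)) 0).foldl
        (fun (st : String × List (PySem.Dict String Int)) p =>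
          let pfx := if p.1 == 0 then p.2 else st.1 ++ "; " ++ p.2
          let bucket := PySem.List.pyGetD st.2 p.1 PySem.Dict.empty
          (pfx, PySem.List.pySetD st.2 p.1 (bucket.insert pfx (bucket.getD pfx 0 + 1))))
        ("", per_rank)).2) pr
    = (List.range 8).map (fun j => pvAddOnes (pr.getD j PySem.Dict.empty) (pvYs ((j : Int) + 1) ls)) := by
  induction ls generalizing pr with
  | nil =>
    apply List.ext_getElem
    · simp [h]
    · intro j h1 h2
      simp only [List.getElem_map, List.getElem_range]
      have hj : j < 8 := by simpa using h2
      have hjp : j < pr.length := by omega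
      simp [pvYs, pvAddOnes, List.getD_eq_getElem?_getD, List.getElem?_eq_getElem hjp]
  | cons lin ls ih =>
    simp only [List.foldl_cons]
    have hsl : PySem.List.slice lin none (some (8:Int)) = lin.take 8 := by
      rw [PySem.List.slice_to lin (by norm_num)]
      rfl
    have hin := pv_inner_gen (lin.take 8) 0 "" pr
    rw [Nat.cast_zero] at hin
    rw [hsl, hin]
    rw [ih _ (by rw [pv_updAll_length]; exact h)]
    apply List.map_congr_left
    intro j hj
    have hj8 : j < 8 := List.mem_range.mp hj
    have hlen : (pvChain "" 0 (lin.take 8)).length = (lin.take 8).length := pv_chain_length _ _ _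
    have hlen2 : (lin.take 8).length = min 8 lin.length := by simp
    rw [pv_updAll_getD _ _ _ _ (by rw [hlen, h, hlen2]; omega)]
    by_cases hcase : j < (lin.take 8).length
    · rw [if_pos (by rw [hlen]; omega)]
      simp only [Nat.sub_zero]
      have hchainv : (pvChain "" 0 (lin.take 8)).getD j "" =
          PySem.Str.join "; " (lin.take (j + 1)) := by
        have := pv_chain_getD (lin.take 8) [] j hcase
        simp only [List.length_nil, pv_join_empty, List.nil_append] at this
        rw [this, List.take_take]
        rw [Nat.min_eq_left (by omega : j + 1 ≤ 8)]
      rw [hchainv]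
      have hys : pvYs ((j:Int) + 1) (lin :: ls) =
          PySem.Str.join "; " (lin.take (j + 1)) :: pvYs ((j:Int) + 1) ls := by
        simp only [pvYs, List.filter_cons, PySem.List.len_eq]
        have hc : ¬ ((lin.length : Int) < (j:Int) + 1) := by
          rw [hlen2] at hcase
          have := (lt_min_iff.mp hcase).2
          omega
        simp only [hc, decide_false, Bool.not_false, if_true, List.map_cons]
        have ht : (((j:Int) + 1).toNat) = j + 1 := by omega
        rw [pvTax, PySem.List.slice_to lin (by omega), ht]
      rw [hys, pvAddOnes, pvAddOnes, List.foldl_cons]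
    · rw [if_neg (by rw [hlen]; omega)]
      have hys : pvYs ((j:Int) + 1) (lin :: ls) = pvYs ((j:Int) + 1) ls := by
        simp only [pvYs, List.filter_cons, PySem.List.len_eq]
        have hc : ((lin.length : Int) < (j:Int) + 1) := by
          rw [hlen2] at hcase
          have hml : ¬ (j < lin.length) := fun hl => hcase (lt_min_iff.mpr ⟨hj8, hl⟩)
          omega
        simp [hc]
      rw [hys]

theorem pv_A_norm (ls : List (List String)) :
    enumerate_taxonomic_lineages ls =
      (([1, 2, 3, 4, 5, 6, 7, 8] : List Int).foldl
        (fun d r => pvAddOnes d (pvYs r ls)) PySem.Dict.empty).items := by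
  have hr : PySem.List.pyRange 1 9 1 = ([1, 2, 3, 4, 5, 6, 7, 8] : List Int) := by decide
  unfold enumerate_taxonomic_lineages
  dsimp only
  rw [hr]
  simp only [List.foldl_cons, List.foldl_nil, pv_A_inner]

theorem pv_B_norm (ls : List (List String)) :
    enumerate_taxonomic_lineages_alt ls =
      (([1, 2, 3, 4, 5, 6, 7, 8] : List Int).foldl
        (fun d r => pvAddOnes d (pvYs r ls)) PySem.Dict.empty).items := by
  unfold enumerate_taxonomic_lineages_alt
  dsimp only
  rw [pv_outer ls (List.replicate 8 PySem.Dict.empty) (by simp)]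
  have hrg : List.range 8 = [0, 1, 2, 3, 4, 5, 6, 7] := by decide
  rw [hrg]
  simp only [List.map_cons, List.map_nil, List.foldl_cons, List.foldl_nil]
  have grep : ∀ (i : Nat), i < 8 → (List.replicate 8 (PySem.Dict.empty : PySem.Dict String Int)).getD i PySem.Dict.empty = PySem.Dict.empty :=
    fun i h => List.getD_replicate _ h
  rw [grep 0 (by norm_num), grep 1 (by norm_num), grep 2 (by norm_num), grep 3 (by norm_num),
    grep 4 (by norm_num), grep 5 (by norm_num), grep 6 (by norm_num), grep 7 (by norm_num)]
  norm_num
  simp only [pv_merge]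

-- ===== VERDICT (by name: the statement is the Claim_ definition above) =====
theorem enumerate_taxonomic_lineages_spec : Claim_equal_enumerate_taxonomic_lineages := by
  intro ls _
  unfold Spec_enumerate_taxonomic_lineages
  rw [pv_A_norm, pv_B_norm]
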